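-- pv_equiv track=rewrite | github.com/mbollmann/levenshtein | scripts/conv_norm.py | process_alignment
-- ===== SOURCE A (Python) =====
-- BEGIN_TOKEN = "__BEGIN__"
--
-- KEEP_LABEL = "__KEEP__"
--
-- def process_alignment(alignment, epsilon, keep=False, interspersed=False):
--     if interspersed:
--         for r in process_alignment_interspersed(alignment, epsilon):
--             yield r
--         return
--
--     def make(i, o):
--         return (i, o if not keep or i != o else KEEP_LABEL)
--
--     input_token = BEGIN_TOKEN
--     output_token = epsilon
--     for (lhs, rhs) in alignment:
--         if lhs == epsilon:
--             if output_token == epsilon: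
--                 output_token = rhs
--             else:
--                 output_token += rhs
--         else:
--             yield make(input_token, output_token)
--             input_token = lhs
--             output_token = rhs
--     yield make(input_token, output_token)
--
-- def process_alignment_interspersed(alignment, epsilon):
--     input_token = BEGIN_TOKEN
--     output_token = epsilon
--     for (lhs, rhs) in alignment:
--         if lhs == epsilon:
--             if output_token == epsilon:
--                 output_token = rhs
--             else:
--                 output_token += rhs
--         else:
--             yield (input_token, output_token)
--             yield (lhs, rhs)
--             input_token, output_token = epsilon, epsilon
--     yield (input_token, output_token)
-- ===== SOURCE B (Python) =====
-- BEGIN_TOKEN = "__BEGIN__"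
--
-- KEEP_LABEL = "__KEEP__"
--
-- def process_alignment(alignment, epsilon, keep=False, interspersed=False):
--     # Phase 1: split the alignment into segments: a BEGIN segment holding the
--     # leading run of epsilon-lhs lines, then one segment per non-epsilon lhs
--     # holding its rhs followed by the rhs of the trailing epsilon-lhs lines.
--     alignment = list(alignment)
--     n = len(alignment)
--     i = 0
--     rhss = []
--     while i < n and alignment[i][0] == epsilon:
--         rhss.append(alignment[i][1])
--         i += 1
--     segments = [(BEGIN_TOKEN, rhss)]
--     while i < n:
--         lhs, rhs = alignment[i]
--         i += 1
--         rhss = [rhs]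
--         while i < n and alignment[i][0] == epsilon:
--             rhss.append(alignment[i][1])
--             i += 1
--         segments.append((lhs, rhss))
--
--     def fold(rs):
--         out = epsilon
--         for r in rs:
--             out = r if out == epsilon else out + r
--         return out
--
--     # Phase 2: render the segments.
--     if interspersed:
--         first_inp, first_rhss = segments[0]
--         yield (first_inp, fold(first_rhss))
--         for lhs, rhss in segments[1:]:
--             yield (lhs, rhss[0])
--             yield (epsilon, fold(rhss[1:]))
--     else:
--         for inp, rhss in segments:
--             out = fold(rhss)
--             yield (inp, out if not keep or inp != out else KEEP_LABEL)
-- ===== Notes on version B (the rewrite author's own statement) =====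
-- stated objective: alternative
-- what changed: A's single fused streaming loop with mutable (input_token, output_token) state is replaced by a two-phase version: first split the alignment into segments (a BEGIN segment of leading epsilon-lhs lines, then one segment per non-epsilon lhs with its trailing epsilon-lhs lines), then render each segment by folding its rhs values from epsilon with the replace-or-concatenate rule.
import Mathlib
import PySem

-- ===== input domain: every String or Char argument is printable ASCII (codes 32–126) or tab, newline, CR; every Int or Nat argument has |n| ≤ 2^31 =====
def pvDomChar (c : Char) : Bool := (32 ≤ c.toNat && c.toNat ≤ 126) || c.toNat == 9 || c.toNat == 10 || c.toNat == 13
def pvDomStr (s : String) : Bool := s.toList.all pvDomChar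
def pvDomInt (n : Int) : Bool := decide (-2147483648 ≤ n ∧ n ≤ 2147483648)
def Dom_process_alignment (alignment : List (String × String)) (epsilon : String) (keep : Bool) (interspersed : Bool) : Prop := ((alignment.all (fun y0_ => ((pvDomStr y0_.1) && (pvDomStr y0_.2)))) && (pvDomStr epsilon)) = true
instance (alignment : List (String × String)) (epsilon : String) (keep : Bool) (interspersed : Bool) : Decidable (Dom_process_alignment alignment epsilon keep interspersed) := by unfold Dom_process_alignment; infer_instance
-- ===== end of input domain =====

-- B replaces A's fused streaming loop with a two-phase decomposition (split into
-- segments at non-epsilon lhs lines, then render each segment); same cost, 'alternative'.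

-- ===== PORT A =====
-- A's inner `make` closure.
def pvMake (keep : Bool) (i o : String) : String × String :=
  (i, if !keep || i != o then o else "__KEEP__")

-- the for-loop of process_alignment (non-interspersed branch), state (input_token, output_token)
def paLoop (eps : String) (keep : Bool) : List (String × String) → String → String → List (String × String)
  | [], inp, out => [pvMake keep inp out]
  | (lhs, rhs) :: rest, inp, out =>
    if lhs == eps then
      if out == eps then paLoop eps keep rest inp rhs
      else paLoop eps keep rest inp (out ++ rhs)
    else pvMake keep inp out :: paLoop eps keep rest lhs rhs

-- the for-loop of process_alignment_interspersed
def paiLoop (eps : String) : List (String × String) → String → String → List (String × String)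
  | [], inp, out => [(inp, out)]
  | (lhs, rhs) :: rest, inp, out =>
    if lhs == eps then
      if out == eps then paiLoop eps rest inp rhs
      else paiLoop eps rest inp (out ++ rhs)
    else (inp, out) :: (lhs, rhs) :: paiLoop eps rest eps eps

def process_alignment (alignment : List (String × String)) (epsilon : String) (keep : Bool) (interspersed : Bool) : List (String × String) :=
  if interspersed then paiLoop epsilon alignment "__BEGIN__" epsilon
  else paLoop epsilon keep alignment "__BEGIN__" epsilon

-- ===== PORT B =====
-- leading run of epsilon-lhs lines: their rhs values, and the remaining alignment
def pvTakeEps (eps : String) : List (String × String) → List String × List (String × String)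
  | [] => ([], [])
  | (lhs, rhs) :: rest =>
    if lhs == eps then
      let p := pvTakeEps eps rest
      (rhs :: p.1, p.2)
    else ([], (lhs, rhs) :: rest)

theorem pvTakeEps_len (eps : String) (al : List (String × String)) :
    (pvTakeEps eps al).2.length ≤ al.length := by
  induction al with
  | nil => simp [pvTakeEps]
  | cons hd tl ih =>
    obtain ⟨lhs, rhs⟩ := hd
    simp only [pvTakeEps]
    split
    · simpa using Nat.le_succ_of_le ih
    · simp

-- phase 1: one segment per non-epsilon lhs line, holding its rhs plus trailing epsilon-lhs rhs
def pvSegs (eps : String) : List (String × String) → List (String × List String)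
  | [] => []
  | (lhs, rhs) :: rest =>
    let p := pvTakeEps eps rest
    (lhs, rhs :: p.1) :: pvSegs eps p.2
termination_by al => al.length
decreasing_by
  have := pvTakeEps_len eps rest
  simp; omega

def pvStep (eps out r : String) : String := if out == eps then r else out ++ r

-- B's `fold` helper
def pvFold (eps : String) (rs : List String) : String := rs.foldl (pvStep eps) eps

-- interspersed rendering of one non-BEGIN segment
def pvIrender (eps : String) (s : String × List String) : List (String × String) :=
  match s.2 with
  | [] => []
  | r :: es => [(s.1, r), (eps, pvFold eps es)]

def process_alignment_alt (alignment : List (String × String)) (epsilon : String) (keep : Bool) (interspersed : Bool) : List (String × String) :=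
  let p := pvTakeEps epsilon alignment
  let tailSegs := pvSegs epsilon p.2
  -- segments = ("__BEGIN__", p.1) :: tailSegs; phase 2 renders them:
  if interspersed then
    ("__BEGIN__", pvFold epsilon p.1) :: tailSegs.flatMap (pvIrender epsilon)
  else
    (("__BEGIN__", p.1) :: tailSegs).map (fun s => pvMake keep s.1 (pvFold epsilon s.2))

-- ===== PRECONDITION & SPEC =====
def Spec_process_alignment (alignment : List (String × String)) (epsilon : String) (keep : Bool) (interspersed : Bool) (out : List (String × String)) : Prop := out = process_alignment_alt alignment epsilon keep interspersed
instance (alignment : List (String × String)) (epsilon : String) (keep : Bool) (interspersed : Bool) (out : List (String × String)) : Decidable (Spec_process_alignment alignment epsilon keep interspersed out) := by unfold Spec_process_alignment; infer_instance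

-- ===== CLAIM (what is proved, stated in full; the proofs are below) =====
def Claim_equal_process_alignment : Prop := ∀ (alignment : List (String × String)) (epsilon : String) (keep : Bool) (interspersed : Bool), Dom_process_alignment alignment epsilon keep interspersed → Spec_process_alignment alignment epsilon keep interspersed (process_alignment alignment epsilon keep interspersed)

-- ===== LEMMAS AND PROOFS =====

theorem paLoop_eq (eps : String) (keep : Bool) (al : List (String × String))
    (inp out : String) :
    paLoop eps keep al inp out =
      pvMake keep inp ((pvTakeEps eps al).1.foldl (pvStep eps) out)
        :: (pvSegs eps (pvTakeEps eps al).2).map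
            (fun s => pvMake keep s.1 (pvFold eps s.2)) := by
  induction al generalizing inp out with
  | nil => simp [paLoop, pvTakeEps, pvSegs]
  | cons hd rest ih =>
    obtain ⟨lhs, rhs⟩ := hd
    by_cases h : lhs == eps
    · simp only [paLoop, pvTakeEps, h, if_pos, List.foldl]
      by_cases ho : out == eps
      · simpa [ho, pvStep] using ih inp rhs
      · simpa [ho, pvStep] using ih inp (out ++ rhs)
    · simp only [paLoop, pvTakeEps, h]
      rw [pvSegs.eq_def]
      simp [ih lhs rhs, pvFold, pvStep]

theorem paiLoop_eq (eps : String) (al : List (String × String)) (inp out : String) :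
    paiLoop eps al inp out =
      (inp, (pvTakeEps eps al).1.foldl (pvStep eps) out)
        :: (pvSegs eps (pvTakeEps eps al).2).flatMap (pvIrender eps) := by
  induction al generalizing inp out with
  | nil => simp [paiLoop, pvTakeEps, pvSegs]
  | cons hd rest ih =>
    obtain ⟨lhs, rhs⟩ := hd
    by_cases h : lhs == eps
    · simp only [paiLoop, pvTakeEps, h, if_pos, List.foldl]
      by_cases ho : out == eps
      · simpa [ho, pvStep] using ih inp rhs
      · simpa [ho, pvStep] using ih inp (out ++ rhs)
    · simp only [paiLoop, pvTakeEps, h]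
      rw [pvSegs.eq_def]
      simp [ih eps eps, pvIrender, pvFold]

-- ===== VERDICT (by name: the statement is the Claim_ definition above) =====
theorem process_alignment_spec : Claim_equal_process_alignment := by
  intro al eps keep inter _
  unfold Spec_process_alignment process_alignment process_alignment_alt
  cases inter with
  | true => simp [paiLoop_eq, pvFold]
  | false => simp [paLoop_eq, pvFold]
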